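-- pv_equiv track=rewrite | github.com/jaijaish98/SmartHomeAutomation | Backend/object_detection/src/visualizer.py | create_detection_summary
-- ===== SOURCE A (Python) =====
-- def create_detection_summary(detections):
--     """
--     Create a text summary of detections.
--
--     Args:
--         detections: List of detections
--
--     Returns:
--         str: Summary text
--     """
--     if not detections:
--         return "No objects detected"
--
--     class_counts = {}
--     for detection in detections:
--         class_name = detection[1]
--         class_counts[class_name] = class_counts.get(class_name, 0) + 1
--
--     summary_parts = []
--     for class_name, count in sorted(class_counts.items()):
--         summary_parts.append(f"{count} {class_name}{'s' if count > 1 else ''}")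
--
--     return "Detected: " + ", ".join(summary_parts)
-- ===== SOURCE B (Python) =====
-- from itertools import groupby
--
--
-- def create_detection_summary(detections):
--     if not detections:
--         return "No objects detected"
--     names = sorted(d[1] for d in detections)
--     parts = []
--     for name, group in groupby(names):
--         count = sum(1 for _ in group)
--         parts.append(f"{count} {name}{'s' if count > 1 else ''}")
--     return "Detected: " + ", ".join(parts)
-- ===== Notes on version B (the rewrite author's own statement) =====
-- stated objective: alternative
-- what changed: Replaces the class-count dictionary plus sorted(items) with sorting the extracted class names once and run-length grouping the sorted list via itertools.groupby, emitting parts in already-sorted order.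
import Mathlib
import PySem

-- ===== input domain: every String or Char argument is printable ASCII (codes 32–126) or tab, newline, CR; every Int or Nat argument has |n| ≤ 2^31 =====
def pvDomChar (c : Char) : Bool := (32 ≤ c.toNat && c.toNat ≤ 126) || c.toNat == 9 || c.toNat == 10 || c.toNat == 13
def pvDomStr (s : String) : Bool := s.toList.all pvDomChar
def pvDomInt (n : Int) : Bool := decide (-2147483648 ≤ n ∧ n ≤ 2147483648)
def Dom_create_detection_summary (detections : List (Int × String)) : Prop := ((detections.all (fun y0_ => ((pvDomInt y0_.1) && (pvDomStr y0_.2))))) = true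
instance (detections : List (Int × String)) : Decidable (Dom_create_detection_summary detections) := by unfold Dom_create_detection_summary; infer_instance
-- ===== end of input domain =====

-- B replaces A's count-dictionary + sorted(items) with sort-the-names-then-run-length-group (itertools.groupby); same output, alternative algorithm.


-- ===== PORT A =====
def create_detection_summary (detections : List (Int × String)) : String :=
  if detections = [] then "No objects detected"
  else
    let class_counts : PySem.Dict String Int :=
      detections.foldl (fun d detection => d.insert detection.2 (d.getD detection.2 0 + 1)) PySem.Dict.empty
    let summary_parts : List String :=
      (PySem.List.sorted2 class_counts.items (fun p => p.1) (fun p => p.2) false).foldl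
        (fun acc p => acc ++ [PySem.Int.toStr p.2 ++ " " ++ p.1 ++ (if p.2 > 1 then "s" else "")]) []
    "Detected: " ++ PySem.Str.join ", " summary_parts

-- ===== PORT B =====
-- port of Source B's itertools.groupby over the sorted list: run-length grouping of adjacent equal names
def pvRuns : List String → List (String × Int)
  | [] => []
  | x :: xs =>
    match pvRuns xs with
    | [] => [(x, 1)]
    | (y, c) :: t => if x = y then (y, c + 1) :: t else (x, 1) :: (y, c) :: t

def create_detection_summary_alt (detections : List (Int × String)) : String :=
  if detections = [] then "No objects detected"
  else
    let names : List String := PySem.List.sorted (detections.map (fun d => d.2)) (fun x => x) false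
    let parts : List String :=
      (pvRuns names).map (fun p => PySem.Int.toStr p.2 ++ " " ++ p.1 ++ (if p.2 > 1 then "s" else ""))
    "Detected: " ++ PySem.Str.join ", " parts

-- ===== PRECONDITION & SPEC =====
def Spec_create_detection_summary (detections : List (Int × String)) (out : String) : Prop := out = create_detection_summary_alt detections
instance (detections : List (Int × String)) (out : String) : Decidable (Spec_create_detection_summary detections out) := by unfold Spec_create_detection_summary; infer_instance

-- ===== CLAIM (what is proved, stated in full; the proofs are below) =====
def Claim_equal_create_detection_summary : Prop := ∀ (detections : List (Int × String)), Dom_create_detection_summary detections → Spec_create_detection_summary detections (create_detection_summary detections)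

-- ===== LEMMAS AND PROOFS =====

-- comparators that agree on the inserted element vs. the list members give the same insertion
theorem pv_insertBy_congr {α : Type} (f g : α → α → Bool) (x : α) (ys : List α)
    (h : ∀ b ∈ ys, f x b = g x b) : PySem.List.insertBy f x ys = PySem.List.insertBy g x ys := by
  induction ys with
  | nil => rfl
  | cons y ys ih =>
    simp only [PySem.List.insertBy]
    rw [h y (by simp)]
    split
    · rfl
    · rw [ih (fun b hb => h b (by simp [hb]))]

theorem pv_foldl_insertBy_congr {α : Type} (f g : α → α → Bool) (P : α → Prop)
    (hfg : ∀ a b, P a → P b → f a b = g a b) :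
    ∀ (l acc : List α), (∀ x ∈ l, P x) → (∀ x ∈ acc, P x) →
      l.foldl (fun acc x => PySem.List.insertBy f x acc) acc
        = l.foldl (fun acc x => PySem.List.insertBy g x acc) acc := by
  intro l
  induction l with
  | nil => intro acc _ _; rfl
  | cons x xs ih =>
    intro acc hl hacc
    simp only [List.foldl_cons]
    rw [pv_insertBy_congr f g x acc (fun b hb => hfg x b (hl x (by simp)) (hacc b hb))]
    exact ih _ (fun z hz => hl z (by simp [hz]))
      (fun z hz => by
        rcases (PySem.List.mem_insertBy g x z acc).1 hz with h | h
        · exact h ▸ hl x (by simp)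
        · exact hacc z h)

-- when the primary key separates the elements of xs, Python's tuple sort is the primary-key sort
theorem pv_sorted2_eq_sorted {α κ₁ κ₂ : Type} [LinearOrder κ₁] [LinearOrder κ₂]
    (xs : List α) (k1 : α → κ₁) (k2 : α → κ₂)
    (hinj : ∀ a ∈ xs, ∀ b ∈ xs, k1 a = k1 b → a = b) :
    PySem.List.sorted2 xs k1 k2 false = PySem.List.sorted xs k1 false := by
  rw [PySem.List.sorted_eq_foldl_insertBy]
  simp only [PySem.List.sorted2, if_neg (by decide : ¬ (false = true))]
  exact pv_foldl_insertBy_congr _ _ (fun a => a ∈ xs)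
    (fun a b ha hb => by
      by_cases hk : k1 a = k1 b
      · have hab : a = b := hinj a ha b hb hk
        subst hab
        simp
      · rcases lt_or_gt_of_ne hk with h | h
        · simp [h, not_lt.2 (le_of_lt h)]
        · simp [h, not_lt.2 (le_of_lt h)])
    xs [] (fun _ hx => hx) (by simp)

theorem pv_discard_of_not_mem {α : Type} [BEq α] [LawfulBEq α] (s : PySem.Set α) (x : α)
    (h : x ∉ s) : PySem.Set.discard s x = s := by
  simp only [PySem.Set.discard]
  exact List.filter_eq_self.2 (fun y hy => by
    simp only [Bool.not_eq_eq_eq_not, Bool.not_true, beq_eq_false_iff_ne]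
    rintro rfl; exact h hy)

theorem pv_discard_cons_self (x : String) (s : List String) :
    PySem.Set.discard (x :: s) x = PySem.Set.discard s x := by
  simp [PySem.Set.discard]

-- dedup (in first-occurrence order) of a ≤-sorted list is strictly increasing
theorem pv_ofList_pairwise_lt (l : List String) (h : l.Pairwise (· ≤ ·)) :
    (PySem.Set.ofList l).Pairwise (· < ·) := by
  induction l with
  | nil => simp [PySem.Set.ofList, PySem.Set.empty]
  | cons x xs ih =>
    rcases List.pairwise_cons.1 h with ⟨hx, hxs⟩
    rw [PySem.Set.ofList_cons]
    refine List.pairwise_cons.2 ⟨?_, ?_⟩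
    · intro y hy
      rcases (PySem.Set.mem_discard _ _ _).1 hy with ⟨hy1, hy2⟩
      exact lt_of_le_of_ne (hx y ((PySem.Set.mem_ofList xs y).1 hy1)) (Ne.symm hy2)
    · exact (ih hxs).sublist List.filter_sublist

theorem pvRuns_cons (x : String) (xs : List String) :
    pvRuns (x :: xs) = match pvRuns xs with
      | [] => [(x, 1)]
      | (y, c) :: t => if x = y then (y, c + 1) :: t else (x, 1) :: (y, c) :: t := rfl

-- run-length grouping of a ≤-sorted list = the distinct elements with their multiplicities
theorem pv_runs_eq (l : List String) (h : l.Pairwise (· ≤ ·)) :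
    pvRuns l = (PySem.Set.ofList l).map (fun k => (k, (l.count k : Int))) := by
  induction l with
  | nil => rfl
  | cons x xs ih =>
    rcases List.pairwise_cons.1 h with ⟨hx, hxs⟩
    rw [PySem.Set.ofList_cons]
    match xs, ih with
    | [], _ => simp [pvRuns, PySem.Set.ofList, PySem.Set.empty, PySem.Set.discard]
    | z :: xs', ih =>
      have ihz := ih hxs
      rw [PySem.Set.ofList_cons, List.map_cons] at ihz
      have hznot : z ∉ (PySem.Set.ofList xs').discard z :=
        fun hm => ((PySem.Set.mem_discard _ _ _).1 hm).2 rfl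
      by_cases hxz : x = z
      · subst hxz
        rw [pvRuns_cons, ihz]
        simp only []
        rw [PySem.Set.ofList_cons, List.map_cons]
        rw [show (PySem.Set.discard (x :: PySem.Set.discard (PySem.Set.ofList xs') x) x)
              = PySem.Set.discard (PySem.Set.ofList xs') x from by
          rw [pv_discard_cons_self, pv_discard_of_not_mem _ _ hznot]]
        refine List.cons_eq_cons.2 ⟨?_, ?_⟩
        · have : (x :: x :: xs').count x = (x :: xs').count x + 1 := by
            simp
          rw [this]; push_cast; ring_nf
        · exact List.map_congr_left (fun k hk => by
            have hne : k ≠ x := ((PySem.Set.mem_discard _ _ _).1 hk).2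
            simp [Ne.symm hne])
      · have hxnotmem : x ∉ (z :: xs') := by
          intro hm
          rcases List.mem_cons.1 hm with rfl | hm'
          · exact hxz rfl
          · exact hxz (le_antisymm (hx z List.mem_cons_self)
              ((List.pairwise_cons.1 hxs).1 x hm'))
        rw [pvRuns_cons, ihz]
        simp only [if_neg hxz]
        rw [show ((PySem.Set.ofList (z :: xs')).discard x) = PySem.Set.ofList (z :: xs') from
          pv_discard_of_not_mem _ _ (fun hm => hxnotmem ((PySem.Set.mem_ofList _ _).1 hm))]
        rw [PySem.Set.ofList_cons, List.map_cons, List.map_cons]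
        refine List.cons_eq_cons.2 ⟨?_, ?_⟩
        · simp [List.count_eq_zero_of_not_mem hxnotmem]
        · refine List.cons_eq_cons.2 ⟨?_, ?_⟩
          · simp [hxz]
          · exact List.map_congr_left (fun k hk => by
              have hk' : k ∈ (z :: xs') := by
                have := ((PySem.Set.mem_discard _ _ _).1 hk).1
                exact List.mem_cons_of_mem _ ((PySem.Set.mem_ofList _ _).1 this)
              have hne : k ≠ x := fun hkx => hxnotmem (hkx ▸ hk')
              simp [List.count_cons, Ne.symm hne])

-- the heart of the equivalence: sorted distinct-class/count pairs = run-length groups of the sorted names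
theorem pv_sorted_counts_eq_runs (ns : List String) :
    PySem.List.sorted2 ((PySem.Set.ofList ns).map (fun k => (k, (List.count k ns : Int))))
        (fun p => p.1) (fun p => p.2) false
      = pvRuns (PySem.List.sorted ns (fun x => x) false) := by
  have hsp : (PySem.List.sorted ns (fun x => x) false).Pairwise (· ≤ ·) :=
    PySem.List.sorted_pairwise ns (fun x => x)
  have hcnt : ∀ k, List.count k (PySem.List.sorted ns (fun x => x) false) = List.count k ns :=
    fun k => (PySem.List.sorted_perm ns (fun x => x) false).count_eq k
  rw [pv_runs_eq _ hsp,
    List.map_congr_left (fun k _ => by simp only [hcnt k] :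
      ∀ k ∈ PySem.Set.ofList (PySem.List.sorted ns (fun x => x) false),
        (fun k => (k, (List.count k (PySem.List.sorted ns (fun x => x) false) : Int))) k
          = (fun k => (k, (List.count k ns : Int))) k)]
  have hSlt : (PySem.Set.ofList (PySem.List.sorted ns (fun x => x) false)).Pairwise (· < ·) :=
    pv_ofList_pairwise_lt _ hsp
  have hperm : (PySem.Set.ofList (PySem.List.sorted ns (fun x => x) false)).Perm
      (PySem.Set.ofList ns) := by
    refine (List.perm_ext_iff_of_nodup (PySem.Set.nodup_ofList _)
      (PySem.Set.nodup_ofList ns)).2 (fun a => ?_)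
    rw [PySem.Set.mem_ofList, PySem.Set.mem_ofList, PySem.List.mem_sorted]
  have hinj : ∀ a ∈ (PySem.Set.ofList ns).map (fun k => (k, (List.count k ns : Int))),
      ∀ b ∈ (PySem.Set.ofList ns).map (fun k => (k, (List.count k ns : Int))),
        a.1 = b.1 → a = b := by
    have hnd : (((PySem.Set.ofList ns).map (fun k => (k, (List.count k ns : Int)))).map
        (fun p => p.1)).Nodup := by
      rw [List.map_map]
      rw [show ((fun p : String × Int => p.1) ∘ (fun k => (k, (List.count k ns : Int)))) = id
        from rfl, List.map_id]
      exact PySem.Set.nodup_ofList ns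
    exact fun a ha b hb hab => List.inj_on_of_nodup_map hnd ha hb hab
  rw [pv_sorted2_eq_sorted _ _ _ hinj]
  refine PySem.List.sorted_eq_of_perm_of_pairwise_lt
    ((PySem.Set.ofList ns).map (fun k => (k, (List.count k ns : Int))))
    ((PySem.Set.ofList (PySem.List.sorted ns (fun x => x) false)).map
      (fun k => (k, (List.count k ns : Int))))
    (fun p => p.1) (hperm.map _) ?_
  rw [List.pairwise_map]
  exact hSlt

-- ===== VERDICT (by name: the statement is the Claim_ definition above) =====
theorem create_detection_summary_spec : Claim_equal_create_detection_summary := by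
  intro detections _
  unfold Spec_create_detection_summary create_detection_summary create_detection_summary_alt
  by_cases hd : detections = []
  · simp [hd]
  · simp only [if_neg hd]
    have hfold : detections.foldl
        (fun d detection => d.insert detection.2 (d.getD detection.2 0 + 1)) PySem.Dict.empty
        = PySem.Dict.counter (detections.map (fun d => d.2)) := by
      rw [← PySem.Dict.foldl_insert_getD_add_one_eq_counter, List.foldl_map]
    rw [hfold, PySem.Dict.items_counter, PySem.List.foldl_append_singleton_eq_map,
      List.nil_append, pv_sorted_counts_eq_runs]
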